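-- pv_equiv track=rewrite | github.com/tripathivinay82/MyPython | HR-The-Minon-Game.py | kevinString
-- ===== SOURCE A (Python) =====
-- def kevinString(string):
--     vowel=['A','E','I','O','U']
--     string=list(string)
--     s1=string.copy()
--
--     for a in range(len(string)):
--         if string[a] in vowel:
--             return listToStr(s1)
--         else:
--             s1.remove(string[a])
--
-- def listToStr(s):
--     s1=''
--     for i in range(len(s)):
--         s1=s1+s[i]
--
--     return s1
-- ===== SOURCE B (Python) =====
-- def kevinString(string):
--     hits = [i for i in (string.find(v) for v in 'AEIOU') if i >= 0]
--     return string[min(hits):] if hits else None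
-- ===== Notes on version B (the rewrite author's own statement) =====
-- stated objective: faster
-- what changed: Replaces A's left-to-right scan that deletes consonants one by one from a copied list (list.remove is linear, and its no-vowel path is quadratic) with five independent str.find searches (one per uppercase vowel) reduced by min, then a single slice from the minimum index.
import Mathlib
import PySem

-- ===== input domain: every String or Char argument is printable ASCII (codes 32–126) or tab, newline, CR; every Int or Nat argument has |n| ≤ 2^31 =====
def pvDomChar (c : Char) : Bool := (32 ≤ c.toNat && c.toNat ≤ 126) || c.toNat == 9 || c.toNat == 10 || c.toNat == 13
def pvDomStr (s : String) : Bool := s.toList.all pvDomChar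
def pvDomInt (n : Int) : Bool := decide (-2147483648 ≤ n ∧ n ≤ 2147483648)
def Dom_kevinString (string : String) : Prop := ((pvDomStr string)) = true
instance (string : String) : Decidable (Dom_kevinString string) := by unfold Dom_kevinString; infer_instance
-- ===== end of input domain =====

-- B replaces A's consonant-deleting scan (quadratic via list.remove) with five per-vowel str.find searches reduced by min, then one slice (objective: faster).

-- ===== PORT A =====
def kevinVowel : List Char := ['A', 'E', 'I', 'O', 'U']

-- port of A's helper listToStr: s1 = s1 + s[i] accumulated left to right
def kevinListToStr (s : List Char) : String :=
  String.ofList (s.foldl (fun acc c => acc ++ [c]) [])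

-- the for-loop of A over range(len(string)); the `none` arms of pyGet?/remove? are
-- unreachable for the arguments kevinString passes (index in range, element present)
def kevinLoop (str s1 : List Char) (idxs : List Nat) : Option String :=
  match idxs with
  | [] => none
  | a :: rest =>
    match PySem.List.pyGet? str (a : Int) with
    | none => none
    | some c =>
      if c ∈ kevinVowel then some (kevinListToStr s1)
      else
        match PySem.List.remove? s1 c with
        | some s' => kevinLoop str s' rest
        | none => none

def kevinString (string : String) : Option String :=
  kevinLoop string.toList string.toList (List.range string.toList.length)

-- ===== PORT B =====
def kevinVowelAlt : List Char := ['A', 'E', 'I', 'O', 'U']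

def kevinString_alt (string : String) : Option String :=
  let hits := (kevinVowelAlt.map (fun v => PySem.Str.find string (String.ofList [v]))).filter
      (fun i => decide (0 ≤ i))
  match PySem.List.min? hits id with
  | none => none
  | some m => some (PySem.Str.slice string (some m) none)

-- ===== PRECONDITION & SPEC =====
def Spec_kevinString (string : String) (out : Option String) : Prop := out = kevinString_alt string
instance (string : String) (out : Option String) : Decidable (Spec_kevinString string out) := by unfold Spec_kevinString; infer_instance

-- ===== CLAIM (what is proved, stated in full; the proofs are below) =====
def Claim_equal_kevinString : Prop := ∀ (string : String), Dom_kevinString string → Spec_kevinString string (kevinString string)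

-- ===== LEMMAS AND PROOFS =====

-- the foldl inside PySem.List.min? never turns a `some` accumulator back into `none`
lemma kevin_foldl_some_ne_none {α β : Type} (f : Option β → α → Option β)
    (hf : ∀ b x, f (some b) x ≠ none) : ∀ (t : List α) (b : β), List.foldl f (some b) t ≠ none := by
  intro t
  induction t with
  | nil => intro b; simp
  | cons x xs ih =>
    intro b
    rw [List.foldl_cons]
    obtain ⟨b', hb'⟩ := Option.ne_none_iff_exists'.mp (hf b x)
    rw [hb']
    exact ih b'

lemma kevin_min?_cons_ne_none (a : Int) (t : List Int) :
    PySem.List.min? (a :: t) id ≠ none := by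
  unfold PySem.List.min?
  rw [List.foldl_cons]
  apply kevin_foldl_some_ne_none
  intro b x
  simp only []
  split <;> simp

lemma kevinListToStr_eq (t : List Char) : kevinListToStr t = String.ofList t := by
  unfold kevinListToStr
  rw [PySem.List.foldl_append_singleton]
  simp

-- common characterisation: substring from the first uppercase vowel, none if there is no vowel
def kevinSpec (t : List Char) : Option String :=
  match t.findIdx? (fun c => decide (c ∈ kevinVowel)) with
  | some j => some (String.ofList (t.drop j))
  | none => none

lemma kevin_singleton_prefix (v : Char) (t : List Char) : [v] <+: t ↔ t.head? = some v := by
  cases t <;> simp [List.cons_prefix_cons, eq_comm]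

lemma kevin_find_none {l : List Char} {v : Char} (h : v ∉ l) :
    PySem.Chars.find l [v] = -1 := by
  rw [PySem.Chars.find_eq_neg_one_iff, List.singleton_infix_iff]; exact h

lemma kevin_find_some {l : List Char} {v : Char} {j : Nat}
    (h : l.findIdx? (· == v) = some j) : PySem.Chars.find l [v] = j := by
  obtain ⟨hjl, hpj, hmin⟩ := List.findIdx?_eq_some_iff_getElem.mp h
  have hvl : v ∈ l := by
    have : l[j] = v := by simpa using hpj
    exact this ▸ List.getElem_mem hjl
  have hne : PySem.Chars.find l [v] ≠ -1 := by
    rw [ne_eq, PySem.Chars.find_eq_neg_one_iff, List.singleton_infix_iff]; simpa using hvl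
  have hzero : PySem.Chars.findFrom l [v] ((0 : Nat) : Int) = PySem.Chars.find l [v] := by
    simp [PySem.Chars.findFrom_zero]
  obtain ⟨h0, hpre, hlt⟩ :=
    PySem.Chars.findFrom_natCast_spec l [v] 0 (Nat.zero_le _) (by rw [hzero]; exact hne)
  rw [hzero] at h0 hpre hlt
  set f := PySem.Chars.find l [v] with hf
  have hhead : l[f.toNat]? = some v := by
    have := (kevin_singleton_prefix v _).mp hpre
    rwa [List.head?_drop] at this
  have hfj : f.toNat = j := by
    rcases Nat.lt_trichotomy f.toNat j with hlt' | he | hgt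
    · exfalso
      have hflen : f.toNat < l.length := by
        by_contra hge
        rw [List.getElem?_eq_none (by omega)] at hhead; simp at hhead
      have : l[f.toNat] = v := by
        have := hhead; rwa [List.getElem?_eq_getElem hflen, Option.some.injEq] at this
      exact (hmin f.toNat hlt') (by simpa using this)
    · exact he
    · exfalso
      have := hlt j (Nat.zero_le _) hgt
      rw [kevin_singleton_prefix, List.head?_drop, List.getElem?_eq_getElem hjl] at this
      exact this (by simpa using hpj)
  have : f = (f.toNat : Int) := by omega
  rw [this, hfj]

lemma kevin_alt_eq_spec (s : String) : kevinString_alt s = kevinSpec s.toList := by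
  have hfind : ∀ v : Char,
      PySem.Str.find s (String.ofList [v]) = PySem.Chars.find s.toList [v] := by
    intro v; simp [PySem.Str.find_eq]
  simp only [kevinString_alt, show kevinVowelAlt = kevinVowel from rfl]
  unfold kevinSpec
  cases h : s.toList.findIdx? (fun c => decide (c ∈ kevinVowel)) with
  | none =>
    have hall : ∀ x ∈ s.toList, x ∉ kevinVowel := by
      intro x hx
      have := List.findIdx?_eq_none_iff.mp h x hx
      simpa using this
    have hnil : (kevinVowel.map (fun v => PySem.Chars.find s.toList [v])).filter
        (fun i => decide (0 ≤ i)) = [] := by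
      rw [List.filter_eq_nil_iff]
      intro x hx
      obtain ⟨v, hv, rfl⟩ := List.mem_map.mp hx
      have hvnot : v ∉ s.toList := fun hmem => hall v hmem hv
      rw [kevin_find_none hvnot]
      decide
    simp [PySem.List.min?, hnil]
  | some j =>
    obtain ⟨hjl, hpj, hmin⟩ := List.findIdx?_eq_some_iff_getElem.mp h
    have hpj' : s.toList[j] ∈ kevinVowel := by simpa using hpj
    have hfidx : s.toList.findIdx? (· == s.toList[j]) = some j := by
      rw [List.findIdx?_eq_some_iff_getElem]
      refine ⟨hjl, by simp, fun i hij => ?_⟩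
      have := hmin i hij
      intro heq
      exact this (by simp_all)
    have hfj : PySem.Chars.find s.toList [s.toList[j]] = j := kevin_find_some hfidx
    set hits := (kevinVowel.map (fun v => PySem.Str.find s (String.ofList [v]))).filter
        (fun i => decide (0 ≤ i)) with hhits
    have hjmem : (j : Int) ∈ hits := by
      rw [hhits, List.mem_filter]
      refine ⟨List.mem_map.mpr ⟨s.toList[j], hpj', ?_⟩, by simp⟩
      rw [hfind, hfj]
    have hlb : ∀ x ∈ hits, (j : Int) ≤ x := by
      intro x hx
      rw [hhits, List.mem_filter] at hx
      obtain ⟨hxm, hx0⟩ := hx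
      obtain ⟨v, hv, rfl⟩ := List.mem_map.mp hxm
      rw [hfind] at hx0 ⊢
      cases hiv : s.toList.findIdx? (· == v) with
      | none =>
        exfalso
        have hvnot : v ∉ s.toList := by
          intro hmem
          have := List.findIdx?_eq_none_iff.mp hiv v hmem
          simp at this
        rw [kevin_find_none hvnot] at hx0
        simp at hx0
      | some i =>
        rw [kevin_find_some hiv]
        obtain ⟨hil, hpi, _⟩ := List.findIdx?_eq_some_iff_getElem.mp hiv
        have hvi : s.toList[i] = v := by simpa using hpi
        have hvvow : s.toList[i] ∈ kevinVowel := hvi ▸ hv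
        have hji : j ≤ i := by
          by_contra hlt'
          exact (hmin i (by omega)) (by simpa using hvvow)
        exact_mod_cast hji
    cases hm : PySem.List.min? hits id with
    | none =>
      exfalso
      cases hq : hits with
      | nil => rw [hq] at hjmem; simp at hjmem
      | cons a t =>
        rw [hq] at hm
        exact kevin_min?_cons_ne_none a t hm
    | some m =>
      have hm1 : m ∈ hits := PySem.List.min?_mem hm
      have hle : m ≤ (j : Int) := PySem.List.min?_isMin hm _ hjmem
      have hge : (j : Int) ≤ m := hlb m hm1
      have hmj : m = (j : Int) := le_antisymm hle hge
      subst hmj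
      have hslice : (PySem.Str.slice s (some (j : Int)) none).toList = s.toList.drop j := by
        simp [PySem.Str.toList_slice, PySem.List.slice_from_natCast]
      have heq : PySem.Str.slice s (some (j : Int)) none = String.ofList (s.toList.drop j) := by
        have h2 := congrArg String.ofList hslice
        rwa [String.ofList_toList] at h2
      simp [heq]

lemma kevinLoop_eq (l : List Char) : ∀ (n a : Nat), a + n = l.length →
    kevinLoop l (l.drop a) (List.range' a n) = kevinSpec (l.drop a) := by
  intro n
  induction n with
  | zero =>
    intro a ha
    have hd : l.drop a = [] := List.drop_eq_nil_of_le (by omega)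
    simp [kevinLoop, kevinSpec, hd]
  | succ n ih =>
    intro a ha
    have hal : a < l.length := by omega
    have hdrop : l.drop a = l[a] :: l.drop (a + 1) := List.drop_eq_getElem_cons hal
    rw [List.range'_succ]
    by_cases hv : l[a] ∈ kevinVowel
    · simp only [kevinLoop, PySem.List.pyGet?_natCast, List.getElem?_eq_getElem hal, if_pos hv]
      rw [kevinListToStr_eq]
      have hfi : (l.drop a).findIdx? (fun c => decide (c ∈ kevinVowel)) = some 0 := by
        rw [hdrop, List.findIdx?_cons]
        simp [hv]
      simp [kevinSpec, hfi]
    · simp only [kevinLoop, PySem.List.pyGet?_natCast, List.getElem?_eq_getElem hal, if_neg hv]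
      rw [hdrop, PySem.List.remove?_cons_self]
      show kevinLoop l (l.drop (a + 1)) (List.range' (a + 1) n) = _
      rw [ih (a + 1) (by omega)]
      unfold kevinSpec
      rw [List.findIdx?_cons]
      cases hft : (l.drop (a + 1)).findIdx? (fun c => decide (c ∈ kevinVowel)) with
      | none => simp [hv]
      | some j =>
        have hadd : a + 1 + j = a + (j + 1) := by omega
        simp [hv, hadd]

-- ===== VERDICT (by name: the statement is the Claim_ definition above) =====
theorem kevinString_spec : Claim_equal_kevinString := by
  intro s _
  unfold Spec_kevinString kevinString
  rw [List.range_eq_range', kevin_alt_eq_spec]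
  have := kevinLoop_eq s.toList s.toList.length 0 (by omega)
  simpa using this
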